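/- GENERATED by tools/from_farm_form.py from prooffarm-gif/accepted/DGifDecompressLine.11/Lemmas.lean (a worked proof of the farm's unit `DGifDecompressLine.11`,
   accepted by the verdict) — do not edit. -/
import Gif.Spec.Units.DGifDecompressLine_11
import Gif.Spec.LzwCarry

/-!
  Lemmas for the unit `DGifDecompressLine.11` (segment 11 of the LZW decoder: the defect test of l.961 and the last push).

  Everything general is in the tree: the 32-bit forms in Gif/Spec/Words.lean (§5c: `sext32_small`, `part32_toInt_small`, `lea32_succ`,
  `setcc_or_zero`; §3: `toNat_ofBV_ofNat32`), the carry of `Body` and `Locals` through the segment's stores in Gif/Spec/LzwCarry.lean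
  (`Body.carry`, `dl_scratch`, `Body.gif_inside`, `Body.pv_inside`, `Body.len_lt`). What is left is the one fact of THIS segment that its
  proof needs twice (at the check of the push and at the exit behind it):

      dl11_guard_false        the guard `StackPtr >= LZ_MAX_CODE || CrntPrefix > LZ_MAX_CODE` was false: `StackPtr < 4095`
-/

open X86 X86.User Asan ProgX.Base ProgX.Base.Spec Gif.Spec

namespace Gif.Spec.DGifDecompressLine_11

/-- **The guard of l.961 was false** (`cmp ebx, 4094 ; setg al ; cmp r12d, 4095 ; setg dl ; or al, dl ; jne` not taken; `h` is the
walker's branch fact `hbr_106e85` as it stands): `StackPtr ≤ 4094`, for a register `x = rbx` that holds a non-negative `int`. The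
second condition (`CrntPrefix > 4095`) is not used: the pushed value is stored as a byte. -/
theorem dl11_guard_false (x : Word) (hx : x.toNat < 2 ^ 31) (q : Prop) [Decidable q]
    (h : ((if (4094#32).toInt < (Word.part .w32 x).toInt then (1 : BitVec 8) else 0) ||| (if q then 1 else 0)).toNat = 0) :
    x.toNat < 4095 := by
  have hboth := (setcc_or_zero _ _).mp h
  have h1 := hboth.1
  have e4094 : (4094#32).toInt = 4094 := by decide
  rw [part32_toInt_small x hx, e4094] at h1
  omega

end Gif.Spec.DGifDecompressLine_11
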